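-- pv_equiv track=rewrite | github.com/moura-code/study | python/PokerHandevaluetor/Pokerhandcalculator.py | is_straight_flush
-- ===== SOURCE A (Python) =====
-- from typing import List, Tuple
-- from collections import defaultdict
--
-- card_order_dict = {"2":2, "3":3, "4":4, "5":5, "6":6, "7":7, "8":8, "9":9, "T":10,"J":11, "Q":12, "K":13, "A":14}
--
-- def is_flush(hand: List[str]) -> Tuple[bool, List[int]]:
--     suits = [h[1] for h in hand]
--
--     values = [i[0] for i in hand]
--     value_counts = defaultdict(lambda:0)
--     for v in values:
--         value_counts[v]+=1
--     if len(set(suits)) == 1: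
--       return (True,[sorted(value_counts.values())])
--     else:
--       return (False,[sorted(value_counts.values())])
--
-- def is_straight(hand: List[str]) -> Tuple[bool, List[int]]:
--     values = [i[0] for i in hand]
--     value_counts = defaultdict(lambda:0)
--     for v in values:
--         value_counts[v] += 1
--     rank_values = [card_order_dict[i] for i in values]
--     value_range = max(rank_values) - min(rank_values)
--     if len(set(value_counts.values())) == 1 and (value_range==4):
--         return (True,[sorted(value_counts.values())])
--     else:
--         if set(values) == set(["A", "2", "3", "4", "5"]):
--             return (True,[sorted(value_counts.values())])
--         return (False,[sorted(value_counts.values())])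
--
-- def is_straight_flush(hand: List[str]) -> Tuple[bool, List[int]]:
--     values = [i[0] for i in hand]
--     value_counts = defaultdict(lambda:0)
--     for v in values:
--         value_counts[v]+=1
--     if is_flush(hand)[0] and is_straight(hand)[0]:
--         return (True,[sorted(value_counts.values())])
--     else:
--         return (False,[sorted(value_counts.values())])
-- ===== SOURCE B (Python) =====
-- from typing import List, Tuple
--
-- card_order_dict = {"2":2, "3":3, "4":4, "5":5, "6":6, "7":7, "8":8, "9":9, "T":10,"J":11, "Q":12, "K":13, "A":14}
--
-- def is_straight_flush(hand: List[str]) -> Tuple[bool, List[int]]: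
--     # sort-then-scan: no dicts, no sets. Run-length-encode the sorted rank chars;
--     # flush = every suit equals the first; straight read off the run lengths and
--     # the distinct (sorted) rank chars.
--     ok = len(hand) > 0 and all(card[1] == hand[0][1] for card in hand)
--     values = sorted(card[0] for card in hand)
--     distinct = []
--     runs = []
--     for v in values:
--         if distinct and distinct[-1] == v:
--             runs[-1] += 1
--         else:
--             distinct.append(v)
--             runs.append(1)
--     if ok:
--         ranks = [card_order_dict[v] for v in distinct]
--         ok = (min(runs) == max(runs) and max(ranks) - min(ranks) == 4) \
--              or distinct == ["2", "3", "4", "5", "A"]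
--     return (ok, [sorted(runs)])
-- ===== Notes on version B (the rewrite author's own statement) =====
-- stated objective: alternative
-- what changed: Replaced A's dict/set machinery (three rank-count dict builds, suit set, set of counts, set comparison for the wheel) by a sort-then-scan algorithm: sort the rank characters once, run-length-encode them in one linear scan to get the distinct ranks and their multiplicities, test the flush by comparing every suit to the first, and read the straight conditions (uniform run lengths, rank span 4, or distinct == sorted wheel list) off the encoding.
import Mathlib
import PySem

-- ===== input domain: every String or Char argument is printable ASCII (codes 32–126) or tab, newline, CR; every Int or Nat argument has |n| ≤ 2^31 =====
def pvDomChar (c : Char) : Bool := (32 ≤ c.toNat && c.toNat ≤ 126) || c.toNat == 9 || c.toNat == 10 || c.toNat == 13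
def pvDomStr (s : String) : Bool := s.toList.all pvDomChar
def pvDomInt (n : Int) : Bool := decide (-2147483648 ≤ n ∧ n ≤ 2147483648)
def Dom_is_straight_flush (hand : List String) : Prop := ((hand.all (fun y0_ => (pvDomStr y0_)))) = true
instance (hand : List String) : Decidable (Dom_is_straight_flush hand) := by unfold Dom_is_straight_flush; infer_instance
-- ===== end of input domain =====

-- B replaces A's dict/set machinery by a sort-then-scan algorithm (sort the rank chars, run-length-encode them in one scan); same values everywhere A returns.


-- ===== PORT A =====
-- module-level card_order_dict, shared by both Pythons; Python's one-character strings are modelled as Char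
def card_order_dict : PySem.Dict Char Int :=
  PySem.Dict.ofList [('2',2),('3',3),('4',4),('5',5),('6',6),('7',7),('8',8),('9',9),('T',10),('J',11),('Q',12),('K',13),('A',14)]

-- h[i] for a string h; the default is never reached inside Pre_ (card length ≥ 2)
def pvChar (h : String) (i : Int) : Char := (PySem.Str.pyGet? h i).getD ' '

def is_flush (hand : List String) : Bool × List (List Int) :=
  let suits := hand.map (fun h => pvChar h 1)
  let values := hand.map (fun i => pvChar i 0)
  let value_counts := values.foldl (fun d v => d.modify v 0 (· + 1)) PySem.Dict.empty
  if PySem.Set.len (PySem.Set.ofList suits) == 1 then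
    (true, [PySem.List.sorted value_counts.values (fun x => x) false])
  else
    (false, [PySem.List.sorted value_counts.values (fun x => x) false])

def is_straight (hand : List String) : Bool × List (List Int) :=
  let values := hand.map (fun i => pvChar i 0)
  let value_counts := values.foldl (fun d v => d.modify v 0 (· + 1)) PySem.Dict.empty
  -- card_order_dict[i]: the KeyError case (missing key) is outside Pre_ (A only reaches this on flush hands)
  let rank_values := values.map (fun i => (card_order_dict.get? i).getD 0)
  -- max/min of an empty list raise in Python; inside Pre_ this point is only reached on nonempty flush hands
  let value_range := (PySem.List.max? rank_values (fun x => x)).getD 0 -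
                     (PySem.List.min? rank_values (fun x => x)).getD 0
  if PySem.Set.len (PySem.Set.ofList value_counts.values) == 1 && value_range == 4 then
    (true, [PySem.List.sorted value_counts.values (fun x => x) false])
  else
    if PySem.Set.equal (PySem.Set.ofList values) (PySem.Set.ofList ['A','2','3','4','5']) then
      (true, [PySem.List.sorted value_counts.values (fun x => x) false])
    else
      (false, [PySem.List.sorted value_counts.values (fun x => x) false])

def is_straight_flush (hand : List String) : Bool × List (List Int) :=
  let values := hand.map (fun i => pvChar i 0)
  let value_counts := values.foldl (fun d v => d.modify v 0 (· + 1)) PySem.Dict.empty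
  if (is_flush hand).1 && (is_straight hand).1 then
    (true, [PySem.List.sorted value_counts.values (fun x => x) false])
  else
    (false, [PySem.List.sorted value_counts.values (fun x => x) false])

-- ===== PORT B =====
-- one step of Source B's run-length-encoding loop over the sorted rank chars:
-- 'if distinct and distinct[-1] == v: runs[-1] += 1 else: append v, append 1'
def pvRleStep (p : List Char × List Int) (v : Char) : List Char × List Int :=
  if !p.1.isEmpty && ((p.1.getLast?.getD ' ') == v) then
    (p.1, p.2.dropLast ++ [(p.2.getLast?.getD 0) + 1])
  else (p.1 ++ [v], p.2 ++ [1])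

def is_straight_flush_alt (hand : List String) : Bool × List (List Int) :=
  let ok := decide (0 < hand.length) && hand.all (fun card => pvChar card 1 == pvChar hand.headI 1)
  let values := PySem.List.sorted (hand.map (fun card => pvChar card 0)) (fun x => x) false
  let dr := values.foldl pvRleStep ([], [])
  let distinct := dr.1
  let runs := dr.2
  let ok := if ok then
      let ranks := distinct.map (fun v => (card_order_dict.get? v).getD 0)
      ((PySem.List.min? runs (fun x => x)).getD 0 == (PySem.List.max? runs (fun x => x)).getD 0 &&
       ((PySem.List.max? ranks (fun x => x)).getD 0 - (PySem.List.min? ranks (fun x => x)).getD 0 == 4))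
      || distinct == ['2','3','4','5','A']
    else ok
  (ok, [PySem.List.sorted runs (fun x => x) false])

-- ===== PRECONDITION & SPEC =====
def pvRanks : List Char := ['2','3','4','5','6','7','8','9','T','J','Q','K','A']

-- Pre_ excludes exactly the inputs where Python A raises: a card shorter than 2 characters (IndexError on h[1]/h[0]),
-- and a flush hand containing a rank character outside card_order_dict (KeyError inside is_straight).
def Pre_is_straight_flush (hand : List String) : Prop :=
  (∀ h ∈ hand, 2 ≤ h.toList.length) ∧
  ((hand ≠ [] ∧ ∀ h ∈ hand, h.toList.getD 1 ' ' = hand.headI.toList.getD 1 ' ') →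
    ∀ h ∈ hand, h.toList.getD 0 ' ' ∈ pvRanks)
instance (hand : List String) : Decidable (Pre_is_straight_flush hand) := by
  unfold Pre_is_straight_flush; infer_instance

def pvWitness_is_straight_flush : List String := ["2s", "3s", "4s", "5s", "6s"]

def Spec_is_straight_flush (hand : List String) (out : Bool × List (List Int)) : Prop := out = is_straight_flush_alt hand
instance (hand : List String) (out : Bool × List (List Int)) : Decidable (Spec_is_straight_flush hand out) := by unfold Spec_is_straight_flush; infer_instance

-- ===== CLAIM (what is proved, stated in full; the proofs are below) =====
def Claim_equal_is_straight_flush : Prop := ∀ (hand : List String), Dom_is_straight_flush hand → Pre_is_straight_flush hand → Spec_is_straight_flush hand (is_straight_flush hand)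

-- ===== LEMMAS AND PROOFS =====

-- abbreviations used only by the proofs
def pvVs0 (hand : List String) : List Char := hand.map (fun i => pvChar i 0)

def pvCnt (hand : List String) : PySem.Dict Char Int := PySem.Dict.counter (pvVs0 hand)

def pvDR (hand : List String) : List Char × List Int :=
  (PySem.List.sorted (pvVs0 hand) (fun x => x) false).foldl pvRleStep ([], [])

-- the RLE loop, rephrased as structural recursion over the current run (head char c, count k so far)
def pvGo : List Char → Char → Int → List Char × List Int
  | [], c, k => ([c], [k])
  | v :: vs, c, k =>
      if v == c then pvGo vs c (k + 1)
      else (c :: (pvGo vs v 1).1, k :: (pvGo vs v 1).2)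

theorem pvStepEq (d : List Char) (r : List Int) (c : Char) (k : Int) :
    pvRleStep (d ++ [c], r ++ [k]) c = (d ++ [c], r ++ [k + 1]) := by
  simp [pvRleStep, List.getLast?_concat, List.dropLast_concat]

theorem pvStepNe (d : List Char) (r : List Int) (c : Char) (k : Int) (v : Char) (h : v ≠ c) :
    pvRleStep (d ++ [c], r ++ [k]) v = ((d ++ [c]) ++ [v], (r ++ [k]) ++ [1]) := by
  have hcv : (c == v) = false := beq_eq_false_iff_ne.mpr (Ne.symm h)
  simp [pvRleStep, List.getLast?_concat, hcv]

theorem pvFoldGo (vs : List Char) (d : List Char) (r : List Int) (c : Char) (k : Int) :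
    vs.foldl pvRleStep (d ++ [c], r ++ [k]) = (d ++ (pvGo vs c k).1, r ++ (pvGo vs c k).2) := by
  induction vs generalizing d r c k with
  | nil => simp [pvGo]
  | cons v vs ih =>
      by_cases h : v = c
      · subst h
        rw [List.foldl_cons, pvStepEq, ih]
        simp [pvGo]
      · rw [List.foldl_cons, pvStepNe d r c k v h, ih]
        simp only [pvGo, if_neg (by simp [h] : ¬ (v == c) = true)]
        simp

theorem pvFoldRle (vs : List Char) :
    vs.foldl pvRleStep ([], []) =
      (match vs with
       | [] => ([], [])
       | v :: t => pvGo t v 1) := by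
  cases vs with
  | nil => rfl
  | cons v t =>
      have h0 : pvRleStep ([], []) v = (([] : List Char) ++ [v], ([] : List Int) ++ [1]) := by
        simp [pvRleStep]
      rw [List.foldl_cons, h0, pvFoldGo]
      rfl

-- membership in the distinct list
theorem pvGoMem (vs : List Char) (c : Char) (k : Int) (a : Char) :
    a ∈ (pvGo vs c k).1 ↔ a = c ∨ a ∈ vs := by
  induction vs generalizing c k with
  | nil => simp [pvGo]
  | cons v vs ih =>
      by_cases h : v = c
      · subst h
        simp only [pvGo, if_pos (by simp : (v == v) = true)]
        rw [ih]
        constructor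
        · rintro (h | h)
          · exact Or.inl h
          · exact Or.inr (List.mem_cons_of_mem _ h)
        · rintro (h | h)
          · exact Or.inl h
          · rcases List.mem_cons.mp h with h' | h'
            · exact Or.inl h'
            · exact Or.inr h'
      · simp only [pvGo, if_neg (by simp [h] : ¬ (v == c) = true)]
        simp only [List.mem_cons, ih]

-- the distinct list of a sorted input is strictly increasing and starts with c
theorem pvGoSorted (vs : List Char) (c : Char) (k : Int)
    (hs : List.Pairwise (· ≤ ·) (c :: vs)) :
    List.Pairwise (· < ·) (pvGo vs c k).1 ∧ (pvGo vs c k).1.head? = some c := by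
  induction vs generalizing c k with
  | nil => exact ⟨by simp [pvGo], by simp [pvGo]⟩
  | cons v vs ih =>
      obtain ⟨hc, hs'⟩ := List.pairwise_cons.mp hs
      have hcv : c ≤ v := hc v (by simp)
      by_cases h : v = c
      · subst h
        simp only [pvGo, if_pos (by simp : (v == v) = true)]
        exact ih v (k + 1) hs'
      · have hlt : c < v := lt_of_le_of_ne hcv (fun hcc => h hcc.symm)
        simp only [pvGo, if_neg (by simp [h] : ¬ (v == c) = true)]
        obtain ⟨h1, h2⟩ := ih v 1 hs'
        refine ⟨List.pairwise_cons.mpr ⟨?_, h1⟩, rfl⟩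
        intro b hb
        rcases (pvGoMem vs v 1 b).mp hb with rfl | hbv
        · exact hlt
        · exact lt_of_lt_of_le hlt ((List.pairwise_cons.mp hs').1 b hbv)

-- runs are the counts of the distinct values in the whole (sorted) list
theorem pvGoRuns (vs : List Char) (c : Char) (k : Int)
    (hs : List.Pairwise (· ≤ ·) (c :: vs)) :
    (pvGo vs c k).2 =
      (pvGo vs c k).1.map (fun x => (if x = c then k else 0) + (vs.count x : Int)) := by
  induction vs generalizing c k with
  | nil => simp [pvGo]
  | cons v vs ih =>
      obtain ⟨hc, hs'⟩ := List.pairwise_cons.mp hs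
      have hcv : c ≤ v := hc v (by simp)
      by_cases h : v = c
      · subst h
        have hvvs : List.Pairwise (· ≤ ·) (v :: vs) := hs'
        simp only [pvGo, if_pos (by simp : (v == v) = true)]
        rw [ih v (k + 1) hvvs]
        apply List.map_congr_left
        intro x _
        by_cases hx : x = v
        · subst hx
          simp [List.count_cons]
          push_cast
          ring
        · simp [List.count_cons, hx, Ne.symm hx]
      · have hlt : c < v := lt_of_le_of_ne hcv (fun hcc => h hcc.symm)
        simp only [pvGo, if_neg (by simp [h] : ¬ (v == c) = true)]
        have hcnt : List.count c (v :: vs) = 0 := by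
          rw [List.count_eq_zero]
          intro hcin
          rcases List.mem_cons.mp hcin with rfl | hcvs
          · exact absurd rfl (ne_of_gt hlt)
          · exact absurd ((List.pairwise_cons.mp hs').1 c hcvs) (not_le.mpr hlt)
        rw [ih v 1 hs']
        simp only [List.map_cons]
        congr 1
        · simp [hcnt]
        · apply List.map_congr_left
          intro x hx
          have hxv : v ≤ x := by
            rcases (pvGoMem vs v 1 x).mp hx with rfl | hxvs
            · exact le_refl x
            · exact (List.pairwise_cons.mp hs').1 x hxvs
          have hxc : x ≠ c := fun hxc => absurd (hxc ▸ hxv) (not_le.mpr hlt)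
          by_cases hxveq : x = v
          · subst hxveq
            simp [hxc, List.count_cons]
            push_cast
            ring
          · simp [hxc, hxveq, Ne.symm hxveq, List.count_cons]

-- structural facts about B's distinct/runs pair
theorem pvDRspec (hand : List String) :
    (∀ a, a ∈ (pvDR hand).1 ↔ a ∈ pvVs0 hand) ∧
    (pvDR hand).1.Pairwise (· < ·) ∧
    (pvDR hand).2 = (pvDR hand).1.map (fun x => ((pvVs0 hand).count x : Int)) := by
  unfold pvDR
  rw [pvFoldRle]
  cases hvs : PySem.List.sorted (pvVs0 hand) (fun x => x) false with
  | nil =>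
      have h0 : pvVs0 hand = [] := by
        rw [← PySem.List.sorted_eq_nil_iff (key := fun x => x) (rev := false), hvs]
      simp [h0]
  | cons c t =>
      have hperm : (c :: t).Perm (pvVs0 hand) := hvs ▸ PySem.List.sorted_perm _ _ _
      have hpw : List.Pairwise (· ≤ ·) (c :: t) := by
        have := PySem.List.sorted_pairwise (xs := pvVs0 hand) (key := fun x => x)
        rw [hvs] at this
        exact this
      refine ⟨?_, (pvGoSorted t c 1 hpw).1, ?_⟩
      · intro a
        rw [pvGoMem, ← hperm.mem_iff]
        simp
      · rw [pvGoRuns t c 1 hpw]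
        apply List.map_congr_left
        intro x _
        rw [← hperm.count_eq]
        simp only [List.count_cons]
        by_cases hx : x = c
        · subst hx
          simp
          omega
        · simp [List.count_cons, hx, Ne.symm hx]

-- counter values as counts over the distinct elements
theorem pvCntValues (hand : List String) :
    (pvCnt hand).values =
      (PySem.Set.ofList (pvVs0 hand)).map (fun k => ((pvVs0 hand).count k : Int)) := by
  unfold pvCnt
  rw [PySem.Dict.values, PySem.Dict.items_counter, List.map_map]
  rfl

-- runs are a permutation of A's dict values
theorem pvRunsPerm (hand : List String) :
    ((pvDR hand).2).Perm ((pvCnt hand).values) := by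
  obtain ⟨hmem, hpw, hruns⟩ := pvDRspec hand
  rw [hruns, pvCntValues]
  apply List.Perm.map
  apply (List.perm_ext_iff_of_nodup ?_ ?_).mpr
  · intro a
    rw [hmem a, PySem.Set.mem_ofList]
  · exact hpw.imp ne_of_lt
  · exact PySem.Set.nodup_ofList _

-- Bool extensionality via the two truth conditions
theorem pvBoolExt {a b : Bool} (h : a = true ↔ b = true) : a = b := by
  cases a <;> cases b <;> simp_all

-- a set has len 1 iff the underlying list is nonempty with all elements equal
theorem pvLenOne {α : Type} [BEq α] [LawfulBEq α] (l : List α) :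
    (PySem.Set.len (PySem.Set.ofList l) == 1) = true ↔
      l ≠ [] ∧ ∀ x ∈ l, ∀ y ∈ l, x = y := by
  constructor
  · intro h
    have hlen : (PySem.Set.ofList l).length = 1 := by
      simpa [PySem.Set.len, Nat.cast_eq_one] using h
    obtain ⟨a, ha⟩ := List.length_eq_one_iff.mp hlen
    have hmem : ∀ x ∈ l, x = a := by
      intro x hx
      have hx' : x ∈ PySem.Set.ofList l := (PySem.Set.mem_ofList _ _).mpr hx
      rw [ha] at hx'
      simpa using hx'
    refine ⟨?_, ?_⟩
    · intro hnil
      subst hnil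
      simp [PySem.Set.ofList] at ha
    · intro x hx y hy
      rw [hmem x hx, hmem y hy]
  · rintro ⟨hne, hall⟩
    obtain ⟨x, t, rfl⟩ := List.exists_cons_of_ne_nil hne
    have hx : x ∈ PySem.Set.ofList (x :: t) := (PySem.Set.mem_ofList _ _).mpr (by simp)
    have hnd : (PySem.Set.ofList (x :: t)).Nodup := PySem.Set.nodup_ofList _
    have hsub : ∀ y ∈ PySem.Set.ofList (x :: t), y = x := by
      intro y hy
      exact hall y ((PySem.Set.mem_ofList _ _).mp hy) x (by simp)
    have hlen : (PySem.Set.ofList (x :: t)).length = 1 := by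
      cases hs : PySem.Set.ofList (x :: t) with
      | nil => rw [hs] at hx; simp at hx
      | cons b u =>
          cases hu : u with
          | nil => simp
          | cons b2 u2 =>
              rw [hs, hu] at hnd hsub
              have hb : b = x := hsub b (by simp)
              have hb2 : b2 = x := hsub b2 (by simp)
              rw [List.nodup_cons] at hnd
              exact absurd (by simp [hb, hb2.symm] : b ∈ b2 :: u2) hnd.1
    simp [PySem.Set.len, hlen]

-- collapse A's '(if c then (true, X) else (d, X))' pattern
theorem pvIfPair2 {b : Type} (c d : Bool) (X : b) :
    (if c = true then (true, X) else (d, X)) = (c || d, X) := by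
  cases c <;> simp

-- A's flush test equals B's all-suits-equal-the-first test
theorem pvFlush (hand : List String) :
    (PySem.Set.len (PySem.Set.ofList (List.map (fun h => pvChar h 1) hand)) == 1) =
      (decide (0 < hand.length) && hand.all (fun card => pvChar card 1 == pvChar hand.headI 1)) := by
  apply pvBoolExt
  rw [pvLenOne]
  cases hand with
  | nil => simp
  | cons h t =>
      simp only [Bool.and_eq_true, decide_eq_true_eq, List.all_eq_true, beq_iff_eq, List.headI]
      constructor
      · rintro ⟨-, hall⟩
        refine ⟨by simp, ?_⟩
        intro card hc
        exact hall _ (List.mem_map_of_mem hc)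
          _ (List.mem_map_of_mem (List.mem_cons_self))
      · rintro ⟨-, hall⟩
        refine ⟨by simp, ?_⟩
        intro x hx y hy
        obtain ⟨cx, hcx, rfl⟩ := List.mem_map.mp hx
        obtain ⟨cy, hcy, rfl⟩ := List.mem_map.mp hy
        rw [hall cx hcx, hall cy hcy]

-- min == max (with getD) on a nonempty Int list iff all elements are equal
theorem pvMinMax (l : List Int) (hne : l ≠ []) :
    ((PySem.List.min? l (fun x => x)).getD 0 == (PySem.List.max? l (fun x => x)).getD 0) = true ↔
      ∀ x ∈ l, ∀ y ∈ l, x = y := by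
  cases hmin : PySem.List.min? l (fun x => x) with
  | none => exact absurd ((PySem.List.min?_eq_none_iff l (fun x => x)).mp hmin) hne
  | some m =>
      cases hmax : PySem.List.max? l (fun x => x) with
      | none => exact absurd ((PySem.List.max?_eq_none_iff l (fun x => x)).mp hmax) hne
      | some M =>
          simp only [Option.getD_some, beq_iff_eq]
          constructor
          · intro hmM x hx y hy
            have h1 : m ≤ x := PySem.List.min?_isMin hmin x hx
            have h2 : x ≤ M := PySem.List.max?_isMax hmax x hx
            have h3 : m ≤ y := PySem.List.min?_isMin hmin y hy
            have h4 : y ≤ M := PySem.List.max?_isMax hmax y hy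
            omega
          · intro hall
            exact hall m (PySem.List.min?_mem hmin) M (PySem.List.max?_mem hmax)

-- max? with the identity key depends only on the membership set
theorem pvMaxCong (xs ys : List Int) (h : ∀ a : Int, a ∈ xs ↔ a ∈ ys) :
    PySem.List.max? xs (fun x => x) = PySem.List.max? ys (fun x => x) := by
  cases hx : PySem.List.max? xs (fun x => x) with
  | none =>
      rw [PySem.List.max?_eq_none_iff] at hx
      subst hx
      rw [eq_comm, PySem.List.max?_eq_none_iff]
      cases ys with
      | nil => rfl
      | cons y t => exact absurd ((h y).mpr (List.mem_cons_self)) (by simp)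
  | some m =>
      cases hy : PySem.List.max? ys (fun x => x) with
      | none =>
          rw [PySem.List.max?_eq_none_iff] at hy
          subst hy
          exact absurd ((h _).mp (PySem.List.max?_mem hx)) (by simp)
      | some n =>
          have h1 := PySem.List.max?_isMax hx
          have h2 := PySem.List.max?_isMax hy
          have hm : m ∈ ys := (h m).mp (PySem.List.max?_mem hx)
          have hn : n ∈ xs := (h n).mpr (PySem.List.max?_mem hy)
          simp only [Option.some.injEq]
          exact le_antisymm (h2 m hm) (h1 n hn)

theorem pvMinCong (xs ys : List Int) (h : ∀ a : Int, a ∈ xs ↔ a ∈ ys) :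
    PySem.List.min? xs (fun x => x) = PySem.List.min? ys (fun x => x) := by
  cases hx : PySem.List.min? xs (fun x => x) with
  | none =>
      rw [PySem.List.min?_eq_none_iff] at hx
      subst hx
      rw [eq_comm, PySem.List.min?_eq_none_iff]
      cases ys with
      | nil => rfl
      | cons y t => exact absurd ((h y).mpr (List.mem_cons_self)) (by simp)
  | some m =>
      cases hy : PySem.List.min? ys (fun x => x) with
      | none =>
          rw [PySem.List.min?_eq_none_iff] at hy
          subst hy
          exact absurd ((h _).mp (PySem.List.min?_mem hx)) (by simp)
      | some n =>
          have h1 := PySem.List.min?_isMin hx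
          have h2 := PySem.List.min?_isMin hy
          have hm : m ∈ ys := (h m).mp (PySem.List.min?_mem hx)
          have hn : n ∈ xs := (h n).mpr (PySem.List.min?_mem hy)
          simp only [Option.some.injEq]
          exact le_antisymm (h1 n hn) (h2 m hm)

-- membership of the rank lists agrees between A (all values) and B (distinct values)
theorem pvRankMem (hand : List String) (a : Int) :
    a ∈ (List.map (fun i => (card_order_dict.get? i).getD 0) (pvVs0 hand)) ↔
      a ∈ ((pvDR hand).1.map (fun v => (card_order_dict.get? v).getD 0)) := by
  obtain ⟨hmem, -, -⟩ := pvDRspec hand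
  simp only [List.mem_map]
  constructor
  · rintro ⟨x, hx, rfl⟩
    exact ⟨x, (hmem x).mpr hx, rfl⟩
  · rintro ⟨x, hx, rfl⟩
    exact ⟨x, (hmem x).mp hx, rfl⟩

-- the uniform-count tests agree on a nonempty hand
theorem pvUniform (hand : List String) (hne : hand ≠ []) :
    (PySem.Set.len (PySem.Set.ofList (pvCnt hand).values) == 1) =
      ((PySem.List.min? (pvDR hand).2 (fun x => x)).getD 0 ==
       (PySem.List.max? (pvDR hand).2 (fun x => x)).getD 0) := by
  obtain ⟨hmem, -, hruns⟩ := pvDRspec hand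
  have hperm := pvRunsPerm hand
  have hvs0 : pvVs0 hand ≠ [] := by
    cases hand with
    | nil => exact absurd rfl hne
    | cons h t => simp [pvVs0]
  have hrne : (pvDR hand).2 ≠ [] := by
    intro h0
    have hd : (pvDR hand).1 = [] := by
      rw [h0] at hruns
      exact (List.map_eq_nil_iff.mp hruns.symm)
    obtain ⟨c, t, hct⟩ := List.exists_cons_of_ne_nil hvs0
    have : c ∈ (pvDR hand).1 := (hmem c).mpr (by rw [hct]; simp)
    rw [hd] at this
    simp at this
  have hvne : (pvCnt hand).values ≠ [] := by
    intro h0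
    exact hrne (List.Perm.eq_nil (h0 ▸ hperm))
  apply pvBoolExt
  rw [pvLenOne, pvMinMax _ hrne]
  constructor
  · rintro ⟨-, hall⟩
    intro x hx y hy
    exact hall x (hperm.mem_iff.mp hx) y (hperm.mem_iff.mp hy)
  · intro hall
    refine ⟨hvne, ?_⟩
    intro x hx y hy
    exact hall x (hperm.mem_iff.mpr hx) y (hperm.mem_iff.mpr hy)

-- A's wheel set comparison equals B's comparison with the sorted distinct list
theorem pvWheel (hand : List String) :
    PySem.Set.equal (PySem.Set.ofList (pvVs0 hand)) (PySem.Set.ofList ['A','2','3','4','5']) =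
      ((pvDR hand).1 == ['2','3','4','5','A']) := by
  obtain ⟨hmem, hpw, -⟩ := pvDRspec hand
  apply pvBoolExt
  rw [PySem.Set.equal_iff, beq_iff_eq]
  constructor
  · intro hall
    have hd : ∀ x, x ∈ (pvDR hand).1 ↔ x ∈ ['2','3','4','5','A'] := by
      intro x
      rw [hmem x]
      have h1 : x ∈ pvVs0 hand ↔ x ∈ (['A','2','3','4','5'] : List Char) := by
        have := hall x
        rw [PySem.Set.mem_ofList, PySem.Set.mem_ofList] at this
        exact this
      rw [h1]
      simp only [List.mem_cons, List.not_mem_nil]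
      tauto
    have hdperm : (pvDR hand).1.Perm ['2','3','4','5','A'] :=
      (List.perm_ext_iff_of_nodup (hpw.imp ne_of_lt) (by decide)).mpr hd
    have h2 := PySem.List.sorted_id_eq_of_perm_of_pairwise
      (['2','3','4','5','A'] : List Char) (pvDR hand).1 hdperm (hpw.imp le_of_lt)
    have h3 := PySem.List.sorted_eq_self_of_pairwise
      (['2','3','4','5','A'] : List Char) (fun x => x) (by decide)
    rw [← h2, h3]
  · intro hd
    intro x
    rw [PySem.Set.mem_ofList, PySem.Set.mem_ofList, ← hmem x, hd]
    simp only [List.mem_cons, List.not_mem_nil]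
    tauto

-- ===== VERDICT (by name: the statement is the Claim_ definition above) =====
theorem is_straight_flush_spec : Claim_equal_is_straight_flush := by
  intro hand _hdom _hpre
  unfold Spec_is_straight_flush
  unfold is_straight_flush is_straight_flush_alt is_flush is_straight
  have hvc : List.foldl (fun d v => d.modify v 0 (· + 1)) PySem.Dict.empty
      (List.map (fun i => pvChar i 0) hand) = pvCnt hand := rfl
  have hdr : List.foldl pvRleStep ([], [])
      (PySem.List.sorted (List.map (fun card => pvChar card 0) hand) (fun x => x) false) = pvDR hand := rfl
  simp only [hvc, hdr, pvIfPair2]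
  obtain ⟨hmem, hpw, hruns⟩ := pvDRspec hand
  have hout : PySem.List.sorted (pvCnt hand).values (fun x => x) false =
      PySem.List.sorted (pvDR hand).2 (fun x => x) false :=
    (PySem.List.sorted_id_eq_sorted_id_iff_perm _ _).mpr (pvRunsPerm hand).symm
  rw [pvFlush hand]
  by_cases hb : (decide (0 < hand.length) && hand.all (fun card => pvChar card 1 == pvChar hand.headI 1)) = true
  · have hne : hand ≠ [] := by
      rcases Bool.and_eq_true_iff.mp hb with ⟨h0, -⟩
      intro h
      subst h
      simp at h0
    have hrk := pvRankMem hand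
    simp only [pvVs0] at hrk
    rw [hb]
    simp only [if_pos rfl]
    rw [pvMaxCong _ _ hrk, pvMinCong _ _ hrk]
    have hu := pvUniform hand hne
    have hw := pvWheel hand
    simp only [pvVs0] at hw
    rw [hu, hw]
    simp [hout]
  · have hb' : (decide (0 < hand.length) && hand.all (fun card => pvChar card 1 == pvChar hand.headI 1)) = false :=
      Bool.not_eq_true _ ▸ (Bool.eq_false_iff.mpr hb)
    rw [hb']
    simp [hout]
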